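-- pv_equiv track=rewrite | github.com/spendright/msd | msd/brand.py | pick_brand_name
-- ===== SOURCE A (Python) =====
-- def pick_brand_name(names, company_names=()):
--     """Given several versions of a brand name, prefer the one
--     that matches a company name, longest, is not all-lowercase,
--     starts with a lowercase letter ("iPhone" > "IPhone"),
--     not all uppercase, has the most capital letters
--     ("BlackBerry" > "Blackberry"), and has the least spaces
--     ("Liquid-Plumr" > "Liquid Plumr").
--     """
--     def keyfunc(n):
--         return (n in company_names,
--                 len(n),
--                 n != n.lower(),
--                 n[0] == n[0].lower(),  # iPhone > IPhone
--                 n != n.upper(),  # BlackBerry > BLACKBERRY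
--                 sum(1 for c in n if c.upper() == c),  # BlackBerry > Blackberry
--                 -len(n.split()))
--
--     return sorted(names, key=keyfunc, reverse=True)[0]
-- ===== SOURCE B (Python) =====
-- def pick_brand_name(names, company_names=()):
--     """Successive refinement instead of a sort: filter the candidate list
--     down by one ranking criterion at a time, then take the first survivor."""
--     company_set = set(company_names)
--     criteria = [
--         lambda n: n in company_set,
--         len,
--         lambda n: any(c != c.lower() for c in n),
--         lambda n: n[0] == n[0].lower(),
--         lambda n: any(c != c.upper() for c in n),
--         lambda n: sum(c == c.upper() for c in n),
--         lambda n: -len(n.split()),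
--     ]
--     cands = list(names)
--     for score in criteria:
--         m = max(score(n) for n in cands)
--         cands = [n for n in cands if score(n) == m]
--     return cands[0]
-- ===== Notes on version B (the rewrite author's own statement) =====
-- stated objective: faster
-- what changed: Replaces sorted(names, key=7-tuple, reverse=True)[0] by successive refinement — the candidate list is filtered down one criterion at a time to the candidates of maximal score and the first survivor is returned — with the company-name criterion answered by a set built once instead of a list membership per key.
import Mathlib
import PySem

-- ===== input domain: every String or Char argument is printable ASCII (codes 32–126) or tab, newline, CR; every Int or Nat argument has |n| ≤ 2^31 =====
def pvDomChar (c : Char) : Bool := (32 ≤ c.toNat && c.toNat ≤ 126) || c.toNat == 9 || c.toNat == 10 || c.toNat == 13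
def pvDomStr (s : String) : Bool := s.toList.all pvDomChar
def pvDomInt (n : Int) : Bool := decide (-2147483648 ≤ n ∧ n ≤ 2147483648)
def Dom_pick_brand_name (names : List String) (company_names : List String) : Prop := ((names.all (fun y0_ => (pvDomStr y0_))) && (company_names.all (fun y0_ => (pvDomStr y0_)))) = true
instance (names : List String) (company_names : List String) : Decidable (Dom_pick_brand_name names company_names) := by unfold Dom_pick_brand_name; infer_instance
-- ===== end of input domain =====

-- B replaces the single reverse sort on a 7-tuple key by successive refinement:
-- it filters the candidate list down by one ranking criterion at a time
-- (keeping the candidates of maximal score) and returns the first survivor;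
-- the company-name criterion uses a set built once (timed measurably faster).

-- ===== PORT A =====
-- keyfunc: the Python 7-tuple ported as List Int (bools as 0/1; tuple comparison
-- on these fixed-length tuples is exactly lexicographic comparison of the lists).
def pvKeyA (company_names : List String) (n : String) : List Int :=
  [(if n ∈ company_names then 1 else 0),
   PySem.Str.len n,
   (if n ≠ PySem.Str.lower n then 1 else 0),
   (if PySem.Str.pyGet? n 0 == (PySem.Str.pyGet? n 0).map PySem.Chars.lowerChar then 1 else 0),
   (if n ≠ PySem.Str.upper n then 1 else 0),
   ((n.toList.countP (fun c => PySem.Chars.upperChar c == c) : Nat) : Int),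
   -((PySem.Str.split₀ n).length : Int)]

-- sorted(names, key=keyfunc, reverse=True)[0]; the [0] (IndexError on empty) as pyGetD under Pre_
def pick_brand_name (names : List String) (company_names : List String) : String :=
  PySem.List.pyGetD (PySem.List.sorted names (pvKeyA company_names) true) 0 ""

-- ===== PORT B =====
-- the seven scoring criteria of Source B, in ranking order (bools as 0/1);
-- company_set is Source B's set(company_names)
def pvCriteria (company_set : PySem.Set String) : List (String → Int) :=
  [fun n => if PySem.Set.contains company_set n then 1 else 0,
   fun n => PySem.Str.len n,
   fun n => if n.toList.any (fun c => c != PySem.Chars.lowerChar c) then 1 else 0,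
   fun n => if PySem.Str.pyGet? n 0 == (PySem.Str.pyGet? n 0).map PySem.Chars.lowerChar then 1 else 0,
   fun n => if n.toList.any (fun c => c != PySem.Chars.upperChar c) then 1 else 0,
   fun n => ((n.toList.countP (fun c => c == PySem.Chars.upperChar c) : Nat) : Int),
   fun n => -((PySem.Str.split₀ n).length : Int)]

-- one refinement stage: m = max(score(n) for n in cands); keep the candidates scoring m
def pvKeepMax (score : String → Int) : List String → List String
  | [] => []
  | c :: cs =>
      let m := cs.foldl (fun a n => max a (score n)) (score c)
      (c :: cs).filter (fun n => score n == m)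

-- run the stages in order, then cands[0] (IndexError on empty, under Pre_) as pyGetD
def pick_brand_name_alt (names : List String) (company_names : List String) : String :=
  let company_set := PySem.Set.ofList company_names
  PySem.List.pyGetD
    ((pvCriteria company_set).foldl (fun cands score => pvKeepMax score cands) names) 0 ""

-- ===== PRECONDITION & SPEC =====
-- Pre_ excludes exactly the inputs on which A raises IndexError: empty `names`
-- (sorted(...)[0]) and any empty string in `names` (keyfunc evaluates n[0]).
def Pre_pick_brand_name (names : List String) (company_names : List String) : Prop :=
  names ≠ [] ∧ "" ∉ names
instance (names : List String) (company_names : List String) : Decidable (Pre_pick_brand_name names company_names) := by unfold Pre_pick_brand_name; infer_instance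

def pvWitness_pick_brand_name : List String × List String := (["iPhone", "IPhone", "BLACKBERRY"], ["IPhone"])

def Spec_pick_brand_name (names : List String) (company_names : List String) (out : String) : Prop := out = pick_brand_name_alt names company_names
instance (names : List String) (company_names : List String) (out : String) : Decidable (Spec_pick_brand_name names company_names out) := by unfold Spec_pick_brand_name; infer_instance

-- ===== CLAIM (what is proved, stated in full; the proofs are below) =====
def Claim_equal_pick_brand_name : Prop := ∀ (names : List String) (company_names : List String), Dom_pick_brand_name names company_names → Pre_pick_brand_name names company_names → Spec_pick_brand_name names company_names (pick_brand_name names company_names)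

-- ===== LEMMAS AND PROOFS =====

-- proof-only helpers: "first element of strictly maximal key", the common
-- characterisation both ports are reduced to
def pvFM (k : String → List Int) (l : List String) (b : String) : String :=
  l.foldl (fun b n => if k b < k n then n else b) b

def pvFirst (k : String → List Int) : List String → String
  | [] => ""
  | h :: t => pvFM k t h

def pvLexKey (fs : List (String → Int)) (n : String) : List Int := fs.map (fun f => f n)

theorem pvFM_cons (k : String → List Int) (x : String) (t : List String) (b : String) :
    pvFM k (x :: t) b = pvFM k t (if k b < k x then x else b) := rfl

theorem pvFirst_cons (k : String → List Int) (h : String) (t : List String) :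
    pvFirst k (h :: t) = pvFM k t h := rfl

theorem insertBy_cons {α : Type} (before : α → α → Bool) (x a : α) (as : List α) :
    PySem.List.insertBy before x (a :: as)
      = if before x a then x :: a :: as else a :: PySem.List.insertBy before x as := rfl

-- head (as getD 0) of the stable insertion sort's accumulator evolves exactly
-- like a linear scan keeping the first element of strictly maximal key
theorem foldl_insertBy_getD_zero {α : Type} (before : α → α → Bool) (d : α) :
    ∀ (l : List α) (a : α) (as : List α),
      (l.foldl (fun acc x => PySem.List.insertBy before x acc) (a :: as)).getD 0 d
        = l.foldl (fun b n => if before n b then n else b) a := by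
  intro l
  induction l with
  | nil => intro a as; rfl
  | cons x l ih =>
      intro a as
      simp only [List.foldl_cons, insertBy_cons]
      by_cases h : before x a = true
      · rw [if_pos h, if_pos h]; exact ih x (a :: as)
      · rw [if_neg h, if_neg h]; exact ih a _

-- with no criteria left, every key is [] and the scan keeps its seed
theorem pvFM_nil_key : ∀ (t : List String) (h : String), pvFM (pvLexKey []) t h = h := by
  intro t
  induction t with
  | nil => intro h; rfl
  | cons x t ih =>
      intro h
      rw [pvFM_cons]
      have hne : ¬ (pvLexKey [] h < pvLexKey [] x) := by
        simp only [pvLexKey, List.map_nil]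
        decide
      rw [if_neg hne]
      exact ih h

-- the running maximum fold: seeded bound, upper bound, and attainment
theorem pvMaxFold (f : String → Int) :
    ∀ (cs : List String) (a : Int),
      a ≤ cs.foldl (fun a n => max a (f n)) a ∧
      (∀ n ∈ cs, f n ≤ cs.foldl (fun a n => max a (f n)) a) ∧
      (a = cs.foldl (fun a n => max a (f n)) a ∨
        ∃ n ∈ cs, f n = cs.foldl (fun a n => max a (f n)) a) := by
  intro cs
  induction cs with
  | nil => intro a; simp
  | cons x t ih =>
      intro a
      obtain ⟨h1, h2, h3⟩ := ih (max a (f x))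
      simp only [List.foldl_cons]
      refine ⟨le_trans (le_max_left _ _) h1, ?_, ?_⟩
      · intro n hn
        rcases List.mem_cons.1 hn with rfl | hn
        · exact le_trans (le_max_right _ _) h1
        · exact h2 n hn
      · rcases h3 with h | ⟨n, hn, hnm⟩
        · rcases max_choice a (f x) with hm | hm
          · exact Or.inl (hm.symm.trans h)
          · exact Or.inr ⟨x, by simp, hm.symm.trans h⟩
        · exact Or.inr ⟨n, List.mem_cons_of_mem _ hn, hnm⟩

-- core refinement step: the first-max scan under the key (f n :: k n) equals
-- filtering to the maximal f-score first and then scanning with k alone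
theorem pvRefineFold (f : String → Int) (k : String → List Int) (m : Int) :
    ∀ (cs : List String) (b : String),
      (∀ n ∈ cs, f n ≤ m) → f b ≤ m → (f b = m ∨ ∃ n ∈ cs, f n = m) →
      pvFM (fun n => f n :: k n) cs b =
        pvFirst k (if f b = m then b :: cs.filter (fun n => f n == m)
                   else cs.filter (fun n => f n == m)) := by
  intro cs
  induction cs with
  | nil =>
      intro b _ _ h3
      have hbm : f b = m := by
        rcases h3 with h | ⟨n, hn, _⟩
        · exact h
        · cases hn
      rw [if_pos hbm]; rfl
  | cons x t ih =>
      intro b h1 h2 h3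
      have hx : f x ≤ m := h1 x (by simp)
      have h1t : ∀ n ∈ t, f n ≤ m := fun n hn => h1 n (List.mem_cons_of_mem _ hn)
      rw [pvFM_cons]
      by_cases hxm : f x = m
      · have hfilter : (x :: t).filter (fun n => f n == m)
            = x :: t.filter (fun n => f n == m) := by
          simp [hxm]
        by_cases hbm : f b = m
        · have hcond : ((f b :: k b) < (f x :: k x)) ↔ (k b < k x) := by
            rw [List.cons_lt_cons_iff]
            constructor
            · rintro (h | ⟨_, h⟩)
              · omega
              · exact h
            · intro h
              exact Or.inr ⟨by omega, h⟩
          have hbif : (if (fun n => f n :: k n) b < (fun n => f n :: k n) x then x else b)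
              = (if k b < k x then x else b) := if_congr hcond rfl rfl
          have hb'm : f (if k b < k x then x else b) = m := by
            split_ifs
            · exact hxm
            · exact hbm
          rw [if_pos hbm, hfilter, pvFirst_cons, pvFM_cons, hbif,
              ih _ h1t (le_of_eq hb'm) (Or.inl hb'm), if_pos hb'm, pvFirst_cons]
        · have hlt : ((f b :: k b) < (f x :: k x)) := by
            rw [List.cons_lt_cons_iff]
            exact Or.inl (by omega)
          rw [if_pos hlt, ih x h1t hx (Or.inl hxm), if_pos hxm, if_neg hbm, hfilter]
      · have hfilter : (x :: t).filter (fun n => f n == m)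
            = t.filter (fun n => f n == m) := by
          simp [hxm]
        by_cases hbm : f b = m
        · have hnot : ¬ ((f b :: k b) < (f x :: k x)) := by
            rw [List.cons_lt_cons_iff]
            rintro (h | ⟨h, _⟩) <;> omega
          rw [if_neg hnot, ih b h1t h2 (Or.inl hbm), if_pos hbm, if_pos hbm, hfilter]
        · have hex : ∃ n ∈ t, f n = m := by
            rcases h3 with h | ⟨n, hn, hnm⟩
            · exact absurd h hbm
            · rcases List.mem_cons.1 hn with rfl | hn
              · exact absurd hnm hxm
              · exact ⟨n, hn, hnm⟩
          have hb'le : f (if (fun n => f n :: k n) b < (fun n => f n :: k n) x then x else b) ≤ m := by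
            split_ifs
            · exact hx
            · exact h2
          have hb'ne : ¬ f (if (fun n => f n :: k n) b < (fun n => f n :: k n) x then x else b) = m := by
            split_ifs
            · exact hxm
            · exact hbm
          rw [ih _ h1t hb'le (Or.inr hex), if_neg hb'ne, if_neg hbm, hfilter]

-- one stage of B equals the filtered form used by pvRefineFold
theorem pvKeepMax_cons (f : String → Int) (c : String) (cs : List String) :
    pvKeepMax f (c :: cs)
      = (if f c = cs.foldl (fun a n => max a (f n)) (f c)
         then c :: cs.filter (fun n => f n == cs.foldl (fun a n => max a (f n)) (f c))
         else cs.filter (fun n => f n == cs.foldl (fun a n => max a (f n)) (f c))) := by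
  simp only [pvKeepMax, List.filter_cons]
  by_cases h : f c = cs.foldl (fun a n => max a (f n)) (f c)
  · rw [if_pos (by simpa using h), if_pos h]
  · rw [if_neg (by simpa using h), if_neg h]

-- the whole refinement chain computes the first element of maximal lexicographic key
theorem pvChain :
    ∀ (fs : List (String → Int)) (l : List String), l ≠ [] →
      (fs.foldl (fun cands score => pvKeepMax score cands) l ≠ [] ∧
       pvFirst (pvLexKey fs) l
         = PySem.List.pyGetD (fs.foldl (fun cands score => pvKeepMax score cands) l) 0 "") := by
  intro fs
  induction fs with
  | nil =>
      intro l hl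
      refine ⟨hl, ?_⟩
      obtain ⟨h, t, rfl⟩ := List.exists_cons_of_ne_nil hl
      rw [List.foldl_nil, pvFirst_cons, pvFM_nil_key]
      simp [PySem.List.pyGetD]
  | cons f fs ih =>
      intro l hl
      obtain ⟨c, cs, rfl⟩ := List.exists_cons_of_ne_nil hl
      obtain ⟨hc, h1, h3⟩ := pvMaxFold f cs (f c)
      have hkey : pvFirst (pvLexKey (f :: fs)) (c :: cs)
          = pvFirst (pvLexKey fs) (pvKeepMax f (c :: cs)) := by
        rw [pvFirst_cons]
        have hstep : pvFM (pvLexKey (f :: fs)) cs c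
            = pvFM (fun n => f n :: pvLexKey fs n) cs c := rfl
        rw [hstep, pvRefineFold f (pvLexKey fs) _ cs c h1 hc h3, pvKeepMax_cons]
      have hne : pvKeepMax f (c :: cs) ≠ [] := by
        rw [pvKeepMax_cons]
        split_ifs with h
        · exact List.cons_ne_nil _ _
        · rcases h3 with h' | ⟨n, hn, hnm⟩
          · exact absurd h' h
          · have hmem : n ∈ cs.filter (fun n => f n == cs.foldl (fun a n => max a (f n)) (f c)) :=
              List.mem_filter.2 ⟨hn, by simpa using hnm⟩
            exact List.ne_nil_of_mem hmem
      obtain ⟨hne', heq⟩ := ih (pvKeepMax f (c :: cs)) hne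
      refine ⟨by simpa using hne', ?_⟩
      rw [hkey, heq]
      rfl

theorem pvMapSelf (g : Char → Char) (l : List Char) : l.map g = l ↔ ∀ c ∈ l, g c = c := by
  induction l with
  | nil => simp
  | cons a t ih => simp [ih]

-- "n != n.lower()" (resp. upper) read per character
theorem pvNeIff (g : Char → Char) (n u : String) (hu : u.toList = n.toList.map g) :
    (n ≠ u) ↔ n.toList.any (fun c => c != g c) = true := by
  rw [ne_eq, ← String.toList_inj, hu, List.any_eq_true]
  constructor
  · intro h
    by_contra hc
    push_neg at hc
    refine h ?_
    refine ((pvMapSelf g n.toList).2 ?_).symm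
    intro c hcm
    have hno := hc c hcm
    by_contra hgc
    exact hno (bne_iff_ne.mpr (fun he => hgc he.symm))
  · rintro ⟨c, hc, hne⟩ heq
    rw [bne_iff_ne] at hne
    exact hne ((pvMapSelf g n.toList).1 heq.symm c hc).symm

-- the two key functions agree
theorem pvKey_eq (company_names : List String) :
    pvKeyA company_names = pvLexKey (pvCriteria (PySem.Set.ofList company_names)) := by
  funext n
  simp only [pvKeyA, pvLexKey, pvCriteria, List.map_cons, List.map_nil]
  simp only [List.cons_eq_cons, and_true, true_and]
  refine ⟨?_, ?_, ?_, ?_⟩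
  · refine if_congr ?_ rfl rfl
    rw [PySem.Set.contains_iff, PySem.Set.mem_ofList]
  · exact if_congr (pvNeIff PySem.Chars.lowerChar n _ (by rw [PySem.Str.toList_lower]; rfl)) rfl rfl
  · exact if_congr (pvNeIff PySem.Chars.upperChar n _ (by rw [PySem.Str.toList_upper]; rfl)) rfl rfl
  · exact congrArg (fun k : Nat => (k : Int)) (List.countP_congr (fun a _ => by rw [Bool.beq_comm]))

-- ===== VERDICT (by name: the statement is the Claim_ definition above) =====
theorem pick_brand_name_spec : Claim_equal_pick_brand_name := by
  intro names company_names _hdom hpre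
  obtain ⟨hne, -⟩ := hpre
  obtain ⟨n, ns, rfl⟩ := List.exists_cons_of_ne_nil hne
  show pick_brand_name (n :: ns) company_names = pick_brand_name_alt (n :: ns) company_names
  unfold pick_brand_name pick_brand_name_alt
  have hA : PySem.List.pyGetD (PySem.List.sorted (n :: ns) (pvKeyA company_names) true) 0 ""
      = pvFirst (pvKeyA company_names) (n :: ns) := by
    simp only [PySem.List.sorted, PySem.List.pyGetD_zero, List.foldl_cons, PySem.List.insertBy]
    rw [foldl_insertBy_getD_zero]
    simp [pvFirst, pvFM]
  rw [hA, pvKey_eq]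
  exact (pvChain (pvCriteria (PySem.Set.ofList company_names)) (n :: ns) (List.cons_ne_nil _ _)).2
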